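-- pv_equiv track=rewrite | github.com/Ruyi-Feng/bartti | bartti/noise.py | _distribute_insert_poses
-- ===== SOURCE A (Python) =====
-- import typing
--
-- MaskScheme = typing.List[typing.Tuple[int, int]]
--
-- def _distribute_insert_poses(abs_insert_poses: typing.List[int], spans: typing.List[int]) -> MaskScheme:
--     offset = 0
--     mask_scheme = []
--     for abs_insert_pos, span in zip(abs_insert_poses, spans):
--         insert_pos = abs_insert_pos + offset
--         mask_scheme.append((insert_pos, span))
--         offset += span + 1
--     return mask_scheme
-- ===== SOURCE B (Python) =====
-- import typing
--
-- MaskScheme = typing.List[typing.Tuple[int, int]]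
--
-- def _distribute_insert_poses(abs_insert_poses: typing.List[int], spans: typing.List[int]) -> MaskScheme:
--     n = min(len(abs_insert_poses), len(spans))
--     return [(abs_insert_poses[k] + sum(spans[:k]) + k, spans[k]) for k in range(n)]
-- ===== Notes on version B (the rewrite author's own statement) =====
-- stated objective: simpler
-- what changed: Replaces the running-offset loop with a closed-form comprehension: the offset before item k equals sum(spans[:k]) + k, so each output pair is computed independently by index.
import Mathlib
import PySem

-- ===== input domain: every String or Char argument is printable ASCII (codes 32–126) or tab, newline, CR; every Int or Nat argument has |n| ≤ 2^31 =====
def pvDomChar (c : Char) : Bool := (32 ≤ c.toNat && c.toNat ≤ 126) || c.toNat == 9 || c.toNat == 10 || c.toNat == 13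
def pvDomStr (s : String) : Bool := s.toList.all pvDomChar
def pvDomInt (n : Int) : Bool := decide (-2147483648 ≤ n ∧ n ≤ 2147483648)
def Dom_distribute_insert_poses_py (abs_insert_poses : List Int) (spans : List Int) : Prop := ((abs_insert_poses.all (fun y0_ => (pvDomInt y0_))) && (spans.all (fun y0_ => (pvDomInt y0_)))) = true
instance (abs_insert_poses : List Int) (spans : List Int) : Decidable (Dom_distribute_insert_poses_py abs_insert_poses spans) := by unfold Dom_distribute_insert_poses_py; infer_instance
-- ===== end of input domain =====

-- ===== PORT A =====
-- B replaces A's running offset with the closed form offset_k = sum(spans[:k]) + k; equivalence of return values is proved.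
def distribute_insert_poses_py (abs_insert_poses : List Int) (spans : List Int) : List (Int × Int) :=
  ((abs_insert_poses.zip spans).foldl
    (fun (st : Int × List (Int × Int)) p =>
      (st.1 + p.2 + 1, st.2 ++ [(p.1 + st.1, p.2)]))
    (0, [])).2

-- ===== PORT B =====
def distribute_insert_poses_py_alt (abs_insert_poses : List Int) (spans : List Int) : List (Int × Int) :=
  -- indices k run over 0..min(len,len)-1, so getD never uses its default; spans[:k] = take k (k ≥ 0)
  (List.range (min abs_insert_poses.length spans.length)).map
    (fun k => (abs_insert_poses.getD k 0 + ((spans.take k).foldl (· + ·) 0) + (k : Int),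
               spans.getD k 0))

-- ===== PRECONDITION & SPEC =====
def Spec_distribute_insert_poses_py (abs_insert_poses : List Int) (spans : List Int) (out : List (Int × Int)) : Prop := out = distribute_insert_poses_py_alt abs_insert_poses spans
instance (abs_insert_poses : List Int) (spans : List Int) (out : List (Int × Int)) : Decidable (Spec_distribute_insert_poses_py abs_insert_poses spans out) := by unfold Spec_distribute_insert_poses_py; infer_instance

-- ===== CLAIM (what is proved, stated in full; the proofs are below) =====
def Claim_equal_distribute_insert_poses_py : Prop := ∀ (abs_insert_poses : List Int) (spans : List Int), Dom_distribute_insert_poses_py abs_insert_poses spans → Spec_distribute_insert_poses_py abs_insert_poses spans (distribute_insert_poses_py abs_insert_poses spans)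

-- ===== LEMMAS AND PROOFS =====
lemma pvFoldlAdd (c : Int) (t : List Int) : t.foldl (· + ·) c = c + t.foldl (· + ·) 0 := by
  induction t generalizing c with
  | nil => simp
  | cons y t ih => simp only [List.foldl_cons]; rw [ih (c + y), ih (0 + y)]; ring

lemma pvMain (a s : List Int) (off : Int) (acc : List (Int × Int)) :
    ((a.zip s).foldl
      (fun (st : Int × List (Int × Int)) p =>
        (st.1 + p.2 + 1, st.2 ++ [(p.1 + st.1, p.2)]))
      (off, acc)).2
    = acc ++ (List.range (min a.length s.length)).map
        (fun k => (a.getD k 0 + ((s.take k).foldl (· + ·) 0) + (k : Int) + off, s.getD k 0)) := by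
  induction a generalizing s off acc with
  | nil => simp
  | cons x a ih =>
    cases s with
    | nil => simp
    | cons y s =>
      simp only [List.zip_cons_cons, List.foldl_cons, List.length_cons]
      rw [ih s (off + y + 1) (acc ++ [(x + off, y)])]
      have hmin : min (a.length + 1) (s.length + 1) = min a.length s.length + 1 := by omega
      rw [hmin, List.range_succ_eq_map, List.map_cons, List.map_map]
      simp only [List.append_assoc, List.singleton_append]
      congr 2
      · simp
      · apply List.map_congr_left
        intro k _
        simp only [Function.comp, List.getD_cons_succ]
        have ht : (y :: s).take (k + 1) = y :: s.take k := rfl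
        rw [ht, List.foldl_cons, pvFoldlAdd (0 + y)]
        simp only [Prod.mk.injEq]
        refine ⟨?_, trivial⟩
        push_cast
        ring

-- ===== VERDICT (by name: the statement is the Claim_ definition above) =====
theorem distribute_insert_poses_py_spec : Claim_equal_distribute_insert_poses_py := by
  intro a s _
  unfold Spec_distribute_insert_poses_py distribute_insert_poses_py distribute_insert_poses_py_alt
  rw [pvMain a s 0 []]
  simp
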